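-- pv_equiv track=rewrite | github.com/ShuangyiTong/Phasic-and-tonic-pain-serve-distinct-functions-during-adaptive-behaviour | core/individual_subject.py | emg_integrate
-- ===== SOURCE A (Python) =====
-- from typing import List, Tuple, Callable, Union, Any
--
-- def emg_integrate(series: List[List[int]], reset_window: int = 30) -> List[List[int]]:
--     acc = 0
--     ret = []
--     for i, x in enumerate(series):
--         acc += x[1]
--         if i >= reset_window:
--             acc -= series[i - reset_window][1]
--         ret.append((x[0], acc))
--     return ret
-- ===== SOURCE B (Python) =====
-- def emg_integrate(series, reset_window=30):
--     # prefix-sum table, then each window sum is a difference of two table entries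
--     P = [0]
--     for x in series:
--         P.append(P[-1] + x[1])
--     ret = []
--     for i, x in enumerate(series):
--         lo = i + 1 - reset_window if i >= reset_window else 0
--         ret.append((x[0], P[i + 1] - P[lo]))
--     return ret
-- ===== Notes on version B (the rewrite author's own statement) =====
-- stated objective: alternative
-- what changed: Replaces the rolling add/subtract accumulator with a precomputed prefix-sum table; each window sum becomes a difference of two table lookups in a separate pass.
import Mathlib
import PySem

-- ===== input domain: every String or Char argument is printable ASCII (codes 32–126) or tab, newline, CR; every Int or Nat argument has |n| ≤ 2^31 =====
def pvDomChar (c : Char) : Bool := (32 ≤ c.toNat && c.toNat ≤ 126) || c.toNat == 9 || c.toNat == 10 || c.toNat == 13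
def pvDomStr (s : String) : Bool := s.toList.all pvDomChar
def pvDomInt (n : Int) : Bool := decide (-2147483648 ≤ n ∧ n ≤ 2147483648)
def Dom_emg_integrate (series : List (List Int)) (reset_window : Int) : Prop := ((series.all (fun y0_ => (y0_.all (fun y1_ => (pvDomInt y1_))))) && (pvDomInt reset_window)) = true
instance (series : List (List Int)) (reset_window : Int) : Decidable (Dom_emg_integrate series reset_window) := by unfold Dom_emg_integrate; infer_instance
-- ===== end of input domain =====

-- B replaces A's rolling accumulator with a prefix-sum table queried twice per element (alternative decomposition, same cost).

-- ===== PORT A =====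
-- loop body: acc += x[1]; if i >= reset_window: acc -= series[i-reset_window][1]; ret.append((x[0], acc))
-- (the pyGetD defaults are unreachable under Pre_emg_integrate)
def pvStepA (series : List (List Int)) (reset_window : Int)
    (st : Int × List (Int × Int)) (ix : Int × List Int) : Int × List (Int × Int) :=
  let acc := st.1 + PySem.List.pyGetD ix.2 1 0
  let acc := if reset_window ≤ ix.1 then
      acc - PySem.List.pyGetD (PySem.List.pyGetD series (ix.1 - reset_window) []) 1 0
    else acc
  (acc, st.2 ++ [(PySem.List.pyGetD ix.2 0 0, acc)])

def emg_integrate (series : List (List Int)) (reset_window : Int) : List (Int × Int) :=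
  ((PySem.List.enumerate series 0).foldl (pvStepA series reset_window) (0, [])).2

-- ===== PORT B =====
-- pass 1: P = [0]; for x in series: P.append(P[-1] + x[1])
def pvStepP (P : List Int) (x : List Int) : List Int :=
  P ++ [PySem.List.pyGetD P (-1) 0 + PySem.List.pyGetD x 1 0]

-- pass 2: ret[i] = (x[0], P[i+1] - P[i+1-reset_window if i >= reset_window else 0])
def emg_integrate_alt (series : List (List Int)) (reset_window : Int) : List (Int × Int) :=
  let P := series.foldl pvStepP [0]
  (PySem.List.enumerate series 0).map (fun ix =>
    let lo := if reset_window ≤ ix.1 then ix.1 + 1 - reset_window else 0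
    (PySem.List.pyGetD ix.2 0 0, PySem.List.pyGetD P (ix.1 + 1) 0 - PySem.List.pyGetD P lo 0))

-- ===== PRECONDITION & SPEC =====
-- Pre_ excludes exactly the inputs where Python A raises IndexError: a negative reset_window with a
-- nonempty series (series[i-reset_window] overruns the right end), or an inner list shorter than 2 (x[1]).
def Pre_emg_integrate (series : List (List Int)) (reset_window : Int) : Prop :=
  (series = [] ∨ 0 ≤ reset_window) ∧ ∀ x ∈ series, 2 ≤ x.length
instance (series : List (List Int)) (reset_window : Int) : Decidable (Pre_emg_integrate series reset_window) := by unfold Pre_emg_integrate; infer_instance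

def pvWitness_emg_integrate : List (List Int) × Int := ([[1, 2], [3, 4], [5, 6]], 2)

def Spec_emg_integrate (series : List (List Int)) (reset_window : Int) (out : List (Int × Int)) : Prop := out = emg_integrate_alt series reset_window
instance (series : List (List Int)) (reset_window : Int) (out : List (Int × Int)) : Decidable (Spec_emg_integrate series reset_window out) := by unfold Spec_emg_integrate; infer_instance

-- ===== CLAIM (what is proved, stated in full; the proofs are below) =====
def Claim_equal_emg_integrate : Prop := ∀ (series : List (List Int)) (reset_window : Int), Dom_emg_integrate series reset_window → Pre_emg_integrate series reset_window → Spec_emg_integrate series reset_window (emg_integrate series reset_window)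

-- ===== LEMMAS AND PROOFS =====

-- x[1] with default 0 (both ports read it identically)
def pvG (x : List Int) : Int := PySem.List.pyGetD x 1 0

-- prefix sum of the first k values x[1]
def pvS (series : List (List Int)) (k : Nat) : Int := ((series.take k).map pvG).sum

-- the running partial sums B's first pass appends after a
def pvSums (a : Int) : List (List Int) → List Int
  | [] => []
  | x :: xs => (a + pvG x) :: pvSums (a + pvG x) xs

-- A's accumulator value just before processing index j (r = reset_window.toNat)
def pvAcc (series : List (List Int)) (r : Nat) (j : Nat) : Int :=
  pvS series j - (if (r : Int) ≤ (j : Int) - 1 then pvS series (j - r) else 0)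

lemma pvS_zero (series : List (List Int)) : pvS series 0 = 0 := by simp [pvS]

lemma pvS_succ (series : List (List Int)) (k : Nat) (hk : k < series.length) :
    pvS series (k + 1) = pvS series k + pvG series[k] := by
  simp only [pvS, List.map_take]
  rw [List.sum_take_succ _ k (by simpa using hk)]
  simp

lemma pvSums_foldl (s : List (List Int)) (pre : List Int) (a : Int) :
    s.foldl pvStepP (pre ++ [a]) = pre ++ a :: pvSums a s := by
  induction s generalizing pre a with
  | nil => simp [pvSums]
  | cons x t ih =>
      simp only [List.foldl_cons, pvStepP, PySem.List.pyGetD_neg_one_append_singleton, pvSums]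
      have h : pre ++ [a] ++ [a + PySem.List.pyGetD x 1 0] = (pre ++ [a]) ++ [a + pvG x] := by
        simp [pvG]
      rw [h, ih]
      simp

lemma pvP_eq (series : List (List Int)) :
    series.foldl pvStepP [0] = 0 :: pvSums 0 series := by
  simpa using pvSums_foldl series [] 0

lemma pvSums_getD (s : List (List Int)) (a : Int) (k : Nat) (hk : k ≤ s.length) :
    (a :: pvSums a s).getD k 0 = a + pvS s k := by
  induction s generalizing a k with
  | nil =>
      have hk0 : k = 0 := by simp at hk; omega
      subst hk0
      simp [pvS]
  | cons x t ih =>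
      cases k with
      | zero => simp [pvS]
      | succ k =>
          have hk' : k ≤ t.length := by simpa using hk
          have h := ih (a + pvG x) k hk'
          simp only [pvSums, List.getD_cons_succ] at h ⊢
          rw [h]
          simp [pvS, add_assoc]

lemma pvAcc_zero (series : List (List Int)) (r : Nat) : pvAcc series r 0 = 0 := by
  simp [pvAcc, pvS_zero]

lemma pvAcc_succ (series : List (List Int)) (r j : Nat) (hj : j < series.length) :
    pvAcc series r (j + 1)
      = pvAcc series r j + pvG series[j] - (if r ≤ j then pvG (series[j - r]'(by omega)) else 0) := by
  by_cases hrj : r ≤ j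
  · have hsub : j - r < series.length := by omega
    have h1 : pvS series (j + 1) = pvS series j + pvG series[j] := pvS_succ series j hj
    have h2 : pvS series (j + 1 - r) = pvS series (j - r) + pvG (series[j - r]'hsub) := by
      have h3 : j + 1 - r = (j - r) + 1 := by omega
      rw [h3, pvS_succ series (j - r) hsub]
    have hifj : (if (r : Int) ≤ (j : Int) - 1 then pvS series (j - r) else 0) = pvS series (j - r) := by
      split_ifs with h
      · rfl
      · have hrj' : r = j := by omega
        subst hrj'
        simp [pvS_zero]
    have hcond : (r : Int) ≤ ((j + 1 : Nat) : Int) - 1 := by push_cast; omega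
    simp only [pvAcc, hifj, if_pos hrj, if_pos hcond, h1, h2]
    ring
  · have hc1 : ¬ ((r : Int) ≤ ((j + 1 : Nat) : Int) - 1) := by push_cast; omega
    have hc2 : ¬ ((r : Int) ≤ (j : Int) - 1) := by omega
    simp only [pvAcc, if_neg hc1, if_neg hc2, if_neg hrj, pvS_succ series j hj]
    ring

-- A's loop invariant: from index j with acc = pvAcc j, the fold appends the windowed pairs
lemma pvA_loop (series : List (List Int)) (r : Nat) :
    ∀ (tail : List (List Int)) (j : Nat) (ret : List (Int × Int)),
      series.drop j = tail →
      ((PySem.List.enumerate tail (j : Int)).foldl (pvStepA series (r : Int)) (pvAcc series r j, ret)).2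
        = ret ++ (PySem.List.enumerate tail (j : Int)).map
            (fun ix => (PySem.List.pyGetD ix.2 0 0, pvAcc series r (ix.1.toNat + 1))) := by
  intro tail
  induction tail with
  | nil => intro j ret _; simp [PySem.List.enumerate_nil]
  | cons x t ih =>
      intro j ret hdrop
      have hj : j < series.length := by
        by_contra h
        rw [List.drop_eq_nil_of_le (by omega)] at hdrop
        exact List.cons_ne_nil _ _ hdrop.symm
      have hget := List.drop_eq_getElem_cons hj
      rw [hdrop] at hget
      have hx : x = series[j] := (List.cons.injEq _ _ _ _ ▸ hget).1
      have ht : t = series.drop (j + 1) := (List.cons.injEq _ _ _ _ ▸ hget).2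
      have hstep : pvStepA series (r : Int) (pvAcc series r j, ret) ((j : Int), x)
          = (pvAcc series r (j + 1), ret ++ [(PySem.List.pyGetD x 0 0, pvAcc series r (j + 1))]) := by
        have hacc : (if (r : Int) ≤ (j : Int) then
              pvAcc series r j + PySem.List.pyGetD x 1 0
                - PySem.List.pyGetD (PySem.List.pyGetD series ((j : Int) - (r : Int)) []) 1 0
            else pvAcc series r j + PySem.List.pyGetD x 1 0) = pvAcc series r (j + 1) := by
          rw [pvAcc_succ series r j hj, ← hx]
          by_cases hrj : r ≤ j
          · have h0 : (0 : Int) ≤ (j : Int) - (r : Int) := by omega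
            have h1 : (j : Int) - (r : Int) < (series.length : Int) := by omega
            have hidx : PySem.List.pyGetD series ((j : Int) - (r : Int)) []
                = series[j - r]'(by omega) := by
              rw [PySem.List.pyGetD_eq_getElem series [] h0 h1]
              congr 1
              omega
            rw [if_pos (by exact_mod_cast hrj : (r:Int) ≤ (j:Int)), if_pos hrj, hidx]
            simp [pvG]
          · rw [if_neg (by omega : ¬ ((r:Int) ≤ (j:Int))), if_neg hrj]
            simp [pvG]
        simp only [pvStepA, hacc]
      rw [PySem.List.enumerate_cons, List.foldl_cons, hstep]
      have hcast : (j : Int) + 1 = ((j + 1 : Nat) : Int) := by push_cast; ring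
      rw [hcast, ih (j + 1) _ ht.symm]
      simp [Int.toNat_natCast]

-- ===== VERDICT (by name: the statement is the Claim_ definition above) =====
theorem emg_integrate_spec : Claim_equal_emg_integrate := by
  intro series reset_window _ hpre
  unfold Spec_emg_integrate
  rcases hpre with ⟨hrw, -⟩
  rcases hrw with hnil | hrw
  · subst hnil; rfl
  · set r : Nat := reset_window.toNat with hr
    have hrwr : reset_window = (r : Int) := by omega
    rw [hrwr]
    have hA := pvA_loop series r series 0 [] (by simp)
    simp only [Nat.cast_zero] at hA
    unfold emg_integrate
    rw [show ((0 : Int), ([] : List (Int × Int))) = (pvAcc series r 0, ([] : List (Int × Int))) by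
          rw [pvAcc_zero]]
    rw [hA]
    simp only [emg_integrate_alt, pvP_eq, List.nil_append]
    apply List.map_congr_left
    intro ix hix
    rw [PySem.List.mem_enumerate_iff] at hix
    obtain ⟨k, hk, rfl⟩ := hix
    simp only [zero_add, Int.toNat_natCast]
    have hP1 : PySem.List.pyGetD (0 :: pvSums 0 series) ((k : Int) + 1) 0 = pvS series (k + 1) := by
      rw [show ((k : Int) + 1) = ((k + 1 : Nat) : Int) by push_cast; ring,
          PySem.List.pyGetD_natCast, pvSums_getD series 0 (k + 1) (by omega)]
      ring
    by_cases hrk : r ≤ k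
    · have hlo : PySem.List.pyGetD (0 :: pvSums 0 series) ((k : Int) + 1 - (r : Int)) 0
          = pvS series (k + 1 - r) := by
        rw [show ((k : Int) + 1 - (r : Int)) = ((k + 1 - r : Nat) : Int) by push_cast [Nat.cast_sub (by omega : r ≤ k + 1)]; ring,
            PySem.List.pyGetD_natCast, pvSums_getD series 0 (k + 1 - r) (by omega)]
        ring
      simp only [if_pos (show (r : Int) ≤ (k : Int) by exact_mod_cast hrk), hP1, hlo]
      have hcond : (r : Int) ≤ ((k + 1 : Nat) : Int) - 1 := by push_cast; omega
      simp only [pvAcc, if_pos hcond]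
    · have hlo : PySem.List.pyGetD (0 :: pvSums 0 series) (0 : Int) 0 = (0 : Int) := by
        simp [PySem.List.pyGetD_zero_cons]
      simp only [if_neg (show ¬ (r : Int) ≤ (k : Int) by exact_mod_cast hrk), hP1, hlo]
      have hcond : ¬ ((r : Int) ≤ ((k + 1 : Nat) : Int) - 1) := by push_cast; omega
      simp only [pvAcc, if_neg hcond]
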